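-- pv_equiv track=rewrite | github.com/Code-2-Create/NSCQuizzer | utils/retriever.py | retrieve_chapter_context
-- ===== SOURCE A (Python) =====
-- def _word_count(text: str) -> int:
--     return len(text.split())
--
-- def _normalize_terms(priority_terms: dict[str, list[str]] | None, chapter: str) -> list[str]:
--     if not priority_terms:
--         return []
--     return [term.strip().lower() for term in priority_terms.get(chapter, []) if term.strip()]
--
-- def _chunk_priority_score(chunk: str, priority_terms: list[str]) -> int:
--     if not priority_terms:
--         return 0
--     lowered_chunk = chunk.lower()
--     return sum(lowered_chunk.count(term) for term in priority_terms)
--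
-- def retrieve_chapter_context(
--     chapter_chunks: dict[str, list[str]],
--     selected_chapters: list[str],
--     priority_terms: dict[str, list[str]] | None = None,
--     max_words: int = 1800,
-- ) -> list[str]:
--     if not selected_chapters:
--         raise ValueError("No chapters selected for retrieval.")
--
--     missing_chapters = [chapter for chapter in selected_chapters if chapter not in chapter_chunks]
--     if missing_chapters:
--         raise ValueError(f"Selected chapters not found: {', '.join(missing_chapters)}")
--
--     combined_chunks: list[str] = []
--     prioritized_chunks = {
--         chapter: sorted(
--             chapter_chunks[chapter],
--             key=lambda chunk: (_chunk_priority_score(chunk, _normalize_terms(priority_terms, chapter)), len(chunk)),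
--             reverse=True,
--         )
--         for chapter in selected_chapters
--     }
--     per_chapter_indices = {chapter: 0 for chapter in selected_chapters}
--     total_words = 0
--
--     while total_words < max_words:
--         progress_made = False
--         for chapter in selected_chapters:
--             chapter_list = prioritized_chunks[chapter]
--             chunk_index = per_chapter_indices[chapter]
--             if chunk_index >= len(chapter_list):
--                 continue
--
--             chunk = chapter_list[chunk_index]
--             chunk_words = _word_count(chunk)
--             if combined_chunks and total_words + chunk_words > max_words:
--                 continue
--
--             combined_chunks.append(f"[{chapter}]\n{chunk}")
--             total_words += chunk_words
--             per_chapter_indices[chapter] += 1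
--             progress_made = True
--
--             if total_words >= max_words:
--                 break
--
--         if not progress_made:
--             break
--
--     if not combined_chunks:
--         raise ValueError("No content could be retrieved for the selected chapters.")
--
--     return combined_chunks
-- ===== SOURCE B (Python) =====
-- def _word_count(text: str) -> int:
--     return len(text.split())
--
-- def _normalize_terms(priority_terms, chapter):
--     if not priority_terms:
--         return []
--     return [term.strip().lower() for term in priority_terms.get(chapter, []) if term.strip()]
--
-- def _chunk_priority_score(chunk, priority_terms):
--     if not priority_terms:
--         return 0
--     lowered_chunk = chunk.lower()
--     return sum(lowered_chunk.count(term) for term in priority_terms)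
--
-- def retrieve_chapter_context(
--     chapter_chunks,
--     selected_chapters,
--     priority_terms=None,
--     max_words=1800,
-- ):
--     if not selected_chapters:
--         raise ValueError("No chapters selected for retrieval.")
--     missing_chapters = [chapter for chapter in selected_chapters if chapter not in chapter_chunks]
--     if missing_chapters:
--         raise ValueError(f"Selected chapters not found: {', '.join(missing_chapters)}")
--
--     sorted_chunks = {
--         chapter: sorted(
--             chapter_chunks[chapter],
--             key=lambda chunk: (_chunk_priority_score(chunk, _normalize_terms(priority_terms, chapter)), len(chunk)),
--             reverse=True,
--         )
--         for chapter in selected_chapters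
--     }
--
--     # Flat round-robin visiting order, computed independently of the word budget.
--     rounds = 0
--     for chapter in selected_chapters:
--         rounds = max(rounds, len(sorted_chunks[chapter]))
--     taken = {chapter: 0 for chapter in selected_chapters}
--     order = []
--     for _ in range(rounds):
--         for chapter in selected_chapters:
--             i = taken[chapter]
--             chunks = sorted_chunks[chapter]
--             if i < len(chunks):
--                 order.append((chapter, chunks[i]))
--                 taken[chapter] = i + 1
--
--     # One flat pass over that order with head-of-line blocking per chapter.
--     combined_chunks = []
--     total_words = 0
--     blocked = set()
--     for chapter, chunk in order:
--         if total_words >= max_words: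
--             break
--         if chapter in blocked:
--             continue
--         chunk_words = _word_count(chunk)
--         if combined_chunks and total_words + chunk_words > max_words:
--             blocked.add(chapter)
--             continue
--         combined_chunks.append(f"[{chapter}]\n{chunk}")
--         total_words += chunk_words
--
--     if not combined_chunks:
--         raise ValueError("No content could be retrieved for the selected chapters.")
--     return combined_chunks
-- ===== Notes on version B (the rewrite author's own statement) =====
-- stated objective: alternative
-- what changed: A interleaves budget accounting with a while/for round-robin loop over per-chapter indices and a progress flag; B first materializes the complete budget-independent round-robin visiting order as a flat list and then does one flat pass over it maintaining only a running word total and a per-chapter blocked set.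
import Mathlib
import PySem

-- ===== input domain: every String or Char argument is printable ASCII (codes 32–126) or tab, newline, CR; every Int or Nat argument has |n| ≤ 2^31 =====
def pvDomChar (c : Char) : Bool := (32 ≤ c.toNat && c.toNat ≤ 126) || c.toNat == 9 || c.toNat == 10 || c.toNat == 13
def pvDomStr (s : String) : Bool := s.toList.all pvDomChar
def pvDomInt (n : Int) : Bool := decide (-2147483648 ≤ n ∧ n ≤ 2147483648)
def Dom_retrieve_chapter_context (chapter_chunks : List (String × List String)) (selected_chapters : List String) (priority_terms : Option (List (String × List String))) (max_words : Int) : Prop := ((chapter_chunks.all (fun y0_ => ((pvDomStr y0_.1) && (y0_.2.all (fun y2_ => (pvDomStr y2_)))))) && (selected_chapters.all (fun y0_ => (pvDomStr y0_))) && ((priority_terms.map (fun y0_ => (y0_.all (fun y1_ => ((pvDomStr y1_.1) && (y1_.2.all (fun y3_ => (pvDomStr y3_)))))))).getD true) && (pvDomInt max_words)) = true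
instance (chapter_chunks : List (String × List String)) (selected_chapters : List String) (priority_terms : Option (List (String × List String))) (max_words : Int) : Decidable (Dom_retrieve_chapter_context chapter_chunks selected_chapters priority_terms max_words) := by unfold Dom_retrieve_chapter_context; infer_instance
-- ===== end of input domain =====

-- B replaces A's interleaved while/for budget loop by a precomputed flat round-robin
-- visiting order followed by one flat pass with a blocked set (alternative decomposition,
-- same cost); equivalence of the returned list is proved on Pre_ (inputs where A raises
-- a ValueError are excluded by Pre_).


-- ===== PORT A =====
-- shared module helpers (_word_count, _normalize_terms, _chunk_priority_score, and the
-- per-chapter sort / index initialisation both Pythons share verbatim)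
def pvWordCount (s : String) : Int := ((PySem.Str.split₀ s).length : Int)

def pvNormalizeTerms (pt : Option (List (String × List String))) (c : String) : List String :=
  match pt with
  | none => []
  | some d =>
    if d = [] then []
    else (((PySem.Dict.mk d).getD c []).filter (fun t => PySem.Str.strip t != "")).map
      (fun t => PySem.Str.lower (PySem.Str.strip t))

def pvChunkScore (chunk : String) (terms : List String) : Int :=
  if terms = [] then 0
  else (terms.map (fun t => (PySem.Str.count (PySem.Str.lower chunk) t : Int))).sum

def pvSortedDict (cc : List (String × List String)) (sel : List String) (pt : Option (List (String × List String))) : PySem.Dict String (List String) :=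
  sel.foldl (fun d c =>
    d.insert c (PySem.List.sorted2 ((PySem.Dict.mk cc).getD c [])
      (fun chunk => pvChunkScore chunk (pvNormalizeTerms pt c))
      (fun chunk => PySem.Str.len chunk) true)) PySem.Dict.empty

def pvZeroIdx (sel : List String) : PySem.Dict String Int :=
  sel.foldl (fun d c => d.insert c 0) PySem.Dict.empty

-- A's inner `for chapter in selected_chapters` loop; the Bool result is progress_made,
-- returning early (without visiting the rest) models the `break` after reaching max_words
def pvInnerA (pc : PySem.Dict String (List String)) (maxW : Int) :
    List String → List String → Int → PySem.Dict String Int → Bool →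
    List String × Int × PySem.Dict String Int × Bool
  | [], combined, total, idx, prog => (combined, total, idx, prog)
  | c :: rest, combined, total, idx, prog =>
    let lst := pc.getD c []
    let i := idx.getD c 0
    if PySem.List.len lst ≤ i then
      pvInnerA pc maxW rest combined total idx prog
    else
      let chunk := PySem.List.pyGetD lst i ""
      let w := pvWordCount chunk
      if combined ≠ [] ∧ maxW < total + w then
        pvInnerA pc maxW rest combined total idx prog
      else
        let combined' := combined ++ ["[" ++ c ++ "]\n" ++ chunk]
        let total' := total + w
        let idx' := idx.insert c (i + 1)
        if maxW ≤ total' then (combined', total', idx', true)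
        else pvInnerA pc maxW rest combined' total' idx' true

-- A's outer `while total_words < max_words` loop; fuel bounds the number of rounds
-- (each continued round appends at least one chunk, so sum of lengths + 1 suffices)
def pvOuterA (pc : PySem.Dict String (List String)) (sel : List String) (maxW : Int) :
    Nat → List String → Int → PySem.Dict String Int → List String
  | 0, combined, _, _ => combined
  | fuel + 1, combined, total, idx =>
    if total < maxW then
      let r := pvInnerA pc maxW sel combined total idx false
      if r.2.2.2 then pvOuterA pc sel maxW fuel r.1 r.2.1 r.2.2.1 else r.1
    else combined

def retrieve_chapter_context (chapter_chunks : List (String × List String)) (selected_chapters : List String) (priority_terms : Option (List (String × List String))) (max_words : Int) : List String :=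
  if selected_chapters = [] then []   -- raise ValueError("No chapters selected ...")
  else if selected_chapters.filter (fun c => !(PySem.Dict.mk chapter_chunks).contains c) ≠ [] then []   -- raise ValueError("Selected chapters not found ...")
  else
    let pc := pvSortedDict chapter_chunks selected_chapters priority_terms
    let idx0 := pvZeroIdx selected_chapters
    let fuel := (selected_chapters.map (fun c => (pc.getD c []).length)).sum + 1
    let combined := pvOuterA pc selected_chapters max_words fuel [] 0 idx0
    if combined = [] then [] else combined   -- raise ValueError("No content ...")

-- ===== PORT B =====
-- one round of B's order generation: visit each selected chapter once, emitting its next chunk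
def pvGenRound (pc : PySem.Dict String (List String)) :
    List String → PySem.Dict String Int → List (String × String) →
    PySem.Dict String Int × List (String × String)
  | [], taken, order => (taken, order)
  | c :: rest, taken, order =>
    let i := taken.getD c 0
    let chunks := pc.getD c []
    if i < PySem.List.len chunks then
      pvGenRound pc rest (taken.insert c (i + 1)) (order ++ [(c, PySem.List.pyGetD chunks i "")])
    else pvGenRound pc rest taken order

-- B's `for _ in range(rounds)` loop building the full visiting order
def pvGen (pc : PySem.Dict String (List String)) (sel : List String) :
    Nat → PySem.Dict String Int → List (String × String) → List (String × String)
  | 0, _, order => order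
  | r + 1, taken, order =>
    let g := pvGenRound pc sel taken order
    pvGen pc sel r g.1 g.2

-- B's single flat pass: running total plus a blocked set, break once the budget is reached
def pvFill (maxW : Int) :
    List (String × String) → List String → Int → PySem.Set String → List String
  | [], out, _, _ => out
  | (c, chunk) :: rest, out, total, blocked =>
    if maxW ≤ total then out
    else if PySem.Set.contains blocked c then pvFill maxW rest out total blocked
    else
      let w := pvWordCount chunk
      if out ≠ [] ∧ maxW < total + w then pvFill maxW rest out total (PySem.Set.add blocked c)
      else pvFill maxW rest (out ++ ["[" ++ c ++ "]\n" ++ chunk]) (total + w) blocked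

def retrieve_chapter_context_alt (chapter_chunks : List (String × List String)) (selected_chapters : List String) (priority_terms : Option (List (String × List String))) (max_words : Int) : List String :=
  if selected_chapters = [] then []   -- raise ValueError("No chapters selected ...")
  else if selected_chapters.filter (fun c => !(PySem.Dict.mk chapter_chunks).contains c) ≠ [] then []   -- raise ValueError("Selected chapters not found ...")
  else
    let pc := pvSortedDict chapter_chunks selected_chapters priority_terms
    let rounds := selected_chapters.foldl (fun acc c => max acc (pc.getD c []).length) 0
    let order := pvGen pc selected_chapters rounds (pvZeroIdx selected_chapters) []
    let out := pvFill max_words order [] 0 PySem.Set.empty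
    if out = [] then [] else out   -- raise ValueError("No content ...")

-- ===== PRECONDITION & SPEC =====
-- Pre_ excludes exactly the inputs where the Python A raises a ValueError: empty selection,
-- a selected chapter missing from chapter_chunks, or nothing collectable (max_words ≤ 0 or
-- every selected chapter has an empty chunk list).
def Pre_retrieve_chapter_context (chapter_chunks : List (String × List String)) (selected_chapters : List String) (priority_terms : Option (List (String × List String))) (max_words : Int) : Prop :=
  selected_chapters ≠ [] ∧
  (∀ c ∈ selected_chapters, (PySem.Dict.mk chapter_chunks).contains c = true) ∧
  0 < max_words ∧
  ∃ c ∈ selected_chapters, (PySem.Dict.mk chapter_chunks).getD c [] ≠ []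
instance (chapter_chunks : List (String × List String)) (selected_chapters : List String) (priority_terms : Option (List (String × List String))) (max_words : Int) : Decidable (Pre_retrieve_chapter_context chapter_chunks selected_chapters priority_terms max_words) := by unfold Pre_retrieve_chapter_context; infer_instance

def pvWitness_retrieve_chapter_context : (List (String × List String)) × List String × (Option (List (String × List String))) × Int :=
  ([("ch1", ["two words", "one"])], ["ch1"], none, 3)

def Spec_retrieve_chapter_context (chapter_chunks : List (String × List String)) (selected_chapters : List String) (priority_terms : Option (List (String × List String))) (max_words : Int) (out : List String) : Prop := out = retrieve_chapter_context_alt chapter_chunks selected_chapters priority_terms max_words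
instance (chapter_chunks : List (String × List String)) (selected_chapters : List String) (priority_terms : Option (List (String × List String))) (max_words : Int) (out : List String) : Decidable (Spec_retrieve_chapter_context chapter_chunks selected_chapters priority_terms max_words out) := by unfold Spec_retrieve_chapter_context; infer_instance

-- ===== CLAIM (what is proved, stated in full; the proofs are below) =====
def Claim_equal_retrieve_chapter_context : Prop := ∀ (chapter_chunks : List (String × List String)) (selected_chapters : List String) (priority_terms : Option (List (String × List String))) (max_words : Int), Dom_retrieve_chapter_context chapter_chunks selected_chapters priority_terms max_words → Pre_retrieve_chapter_context chapter_chunks selected_chapters priority_terms max_words → Spec_retrieve_chapter_context chapter_chunks selected_chapters priority_terms max_words (retrieve_chapter_context chapter_chunks selected_chapters priority_terms max_words)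

-- ===== LEMMAS AND PROOFS =====

-- length of chapter c's sorted chunk list, as a Python int
def pvLen (pc : PySem.Dict String (List String)) (c : String) : Int := PySem.List.len (pc.getD c [])
-- word count of the chunk A is currently stuck on for chapter c
def pvHeadW (pc : PySem.Dict String (List String)) (idx : PySem.Dict String Int) (c : String) : Int :=
  pvWordCount (PySem.List.pyGetD (pc.getD c []) (idx.getD c 0) "")
-- total number of chunks not yet consumed by A's indices (termination measure)
def pvM (pc : PySem.Dict String (List String)) (sel : List String) (idx : PySem.Dict String Int) : Nat :=
  (sel.map (fun c => (pc.getD c []).length - (idx.getD c 0).toNat)).sum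

-- the simulation invariant between A's state (idx) and B's state (taken, blocked)
def pvInv (pc : PySem.Dict String (List String)) (sel : List String) (maxW : Int)
    (idx taken : PySem.Dict String Int) (blocked : PySem.Set String)
    (combined : List String) (total : Int) : Prop :=
  (∀ c, 0 ≤ idx.getD c 0) ∧
  (∀ c, 0 ≤ taken.getD c 0) ∧
  (∀ c ∈ sel, c ∉ blocked → taken.getD c 0 = idx.getD c 0) ∧
  (∀ c ∈ blocked, c ∈ sel ∧ combined ≠ [] ∧ idx.getD c 0 < pvLen pc c ∧ maxW < total + pvHeadW pc idx c)


lemma pvFill_done (maxW : Int) (rest : List (String × String)) (out : List String) (total : Int)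
    (b : PySem.Set String) (h : maxW ≤ total) : pvFill maxW rest out total b = out := by
  cases rest with
  | nil => rfl
  | cons p r => obtain ⟨c, ch⟩ := p; simp [pvFill, h]

lemma pvFill_blocked (maxW : Int) (rest : List (String × String)) (out : List String) (total : Int)
    (b : PySem.Set String) (h : ∀ p ∈ rest, p.1 ∈ b) : pvFill maxW rest out total b = out := by
  induction rest with
  | nil => rfl
  | cons p r ih =>
    obtain ⟨c, ch⟩ := p
    by_cases ht : maxW ≤ total
    · simp [pvFill, ht]
    · have hc : PySem.Set.contains b c = true := by
        exact (PySem.Set.contains_iff _ _).2 (h (c, ch) (by simp))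
      simp only [pvFill, if_neg ht, if_pos hc]
      exact ih (fun p hp => h p (by simp [hp]))

lemma pvGenRound_acc (pc : PySem.Dict String (List String)) (sub : List String)
    (taken : PySem.Dict String Int) (o : List (String × String)) :
    pvGenRound pc sub taken o = ((pvGenRound pc sub taken []).1, o ++ (pvGenRound pc sub taken []).2) := by
  induction sub generalizing taken o with
  | nil => simp [pvGenRound]
  | cons c rest ih =>
    by_cases hi : taken.getD c 0 < PySem.List.len (pc.getD c [])
    · simp only [pvGenRound, if_pos hi]
      rw [ih _ (o ++ [(c, PySem.List.pyGetD (pc.getD c []) (taken.getD c 0) "")]),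
          ih _ ([] ++ [(c, PySem.List.pyGetD (pc.getD c []) (taken.getD c 0) "")])]
      simp
    · simp only [pvGenRound, if_neg hi]
      exact ih _ _

lemma pvGen_acc (pc : PySem.Dict String (List String)) (sel : List String) (r : Nat)
    (taken : PySem.Dict String Int) (o : List (String × String)) :
    pvGen pc sel r taken o = o ++ pvGen pc sel r taken [] := by
  induction r generalizing taken o with
  | zero => simp [pvGen]
  | succ r ih =>
    simp only [pvGen]
    rw [pvGenRound_acc pc sel taken o]
    dsimp only
    rw [ih _ (o ++ (pvGenRound pc sel taken []).2), ih _ (pvGenRound pc sel taken []).2]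
    simp

lemma pvGen_succ (pc : PySem.Dict String (List String)) (sel : List String) (r : Nat)
    (taken : PySem.Dict String Int) :
    pvGen pc sel (r + 1) taken [] =
      (pvGenRound pc sel taken []).2 ++ pvGen pc sel r (pvGenRound pc sel taken []).1 [] := by
  simp only [pvGen]
  rw [pvGen_acc pc sel r (pvGenRound pc sel taken []).1 (pvGenRound pc sel taken []).2]

lemma pvGenRound_mono (pc : PySem.Dict String (List String)) (sub : List String)
    (taken : PySem.Dict String Int) (x : String) :
    taken.getD x 0 ≤ (pvGenRound pc sub taken []).1.getD x 0 := by
  induction sub generalizing taken with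
  | nil => simp [pvGenRound]
  | cons c rest ih =>
    by_cases hi : taken.getD c 0 < PySem.List.len (pc.getD c [])
    · simp only [pvGenRound, if_pos hi]
      rw [pvGenRound_acc]
      dsimp only
      refine le_trans ?_ (ih (taken.insert c (taken.getD c 0 + 1)))
      rw [PySem.Dict.getD_insert]
      split
      · next hxc => subst hxc; omega
      · exact le_refl _
    · simp only [pvGenRound, if_neg hi]
      exact ih taken

lemma pvGenRound_advance (pc : PySem.Dict String (List String)) (sub : List String)
    (taken : PySem.Dict String Int) (c : String) (hc : c ∈ sub)
    (hlt : taken.getD c 0 < pvLen pc c) :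
    taken.getD c 0 < (pvGenRound pc sub taken []).1.getD c 0 := by
  induction sub generalizing taken with
  | nil => cases hc
  | cons a rest ih =>
    by_cases hac : a = c
    · subst hac
      have hi : taken.getD a 0 < PySem.List.len (pc.getD a []) := hlt
      simp only [pvGenRound, if_pos hi]
      rw [pvGenRound_acc]
      dsimp only
      have hmono := pvGenRound_mono pc rest (taken.insert a (taken.getD a 0 + 1)) a
      rw [PySem.Dict.getD_insert] at hmono
      simp only [pvLen] at hlt
      simp at hmono
      omega
    · have hcr : c ∈ rest := by
        rcases List.mem_cons.1 hc with h | h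
        · exact absurd h.symm hac
        · exact h
      by_cases hi : taken.getD a 0 < PySem.List.len (pc.getD a [])
      · simp only [pvGenRound, if_pos hi]
        rw [pvGenRound_acc]
        dsimp only
        have h2 : (taken.insert a (taken.getD a 0 + 1)).getD c 0 = taken.getD c 0 := by
          rw [PySem.Dict.getD_insert, if_neg (fun h => hac h.symm)]
        have := ih (taken.insert a (taken.getD a 0 + 1)) hcr (by rw [h2]; exact hlt)
        rw [h2] at this
        exact this
      · simp only [pvGenRound, if_neg hi]
        exact ih taken hcr hlt

lemma pvGenRound_mem (pc : PySem.Dict String (List String)) (sub : List String)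
    (taken : PySem.Dict String Int) (p : String × String)
    (hp : p ∈ (pvGenRound pc sub taken []).2) :
    p.1 ∈ sub ∧ taken.getD p.1 0 < pvLen pc p.1 := by
  induction sub generalizing taken with
  | nil => simp [pvGenRound] at hp
  | cons c rest ih =>
    by_cases hi : taken.getD c 0 < PySem.List.len (pc.getD c [])
    · simp only [pvGenRound, if_pos hi] at hp
      rw [pvGenRound_acc] at hp
      dsimp only at hp
      simp only [List.nil_append, List.singleton_append, List.mem_cons] at hp
      rcases hp with rfl | hp
      · exact ⟨by simp, hi⟩
      · obtain ⟨h1, h2⟩ := ih (taken.insert c (taken.getD c 0 + 1)) hp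
        refine ⟨by simp [h1], ?_⟩
        rw [PySem.Dict.getD_insert] at h2
        by_cases hpc : p.1 = c
        · rw [hpc]; exact hi
        · rw [if_neg hpc] at h2; exact h2
    · simp only [pvGenRound, if_neg hi] at hp
      obtain ⟨h1, h2⟩ := ih taken hp
      exact ⟨by simp [h1], h2⟩

lemma pvGen_mem (pc : PySem.Dict String (List String)) (sel : List String) (r : Nat)
    (taken : PySem.Dict String Int) (p : String × String)
    (hp : p ∈ pvGen pc sel r taken []) :
    p.1 ∈ sel ∧ taken.getD p.1 0 < pvLen pc p.1 := by
  induction r generalizing taken with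
  | zero => simp [pvGen] at hp
  | succ r ih =>
    rw [pvGen_succ] at hp
    rcases List.mem_append.1 hp with h | h
    · exact pvGenRound_mem pc sel taken p h
    · obtain ⟨h1, h2⟩ := ih (pvGenRound pc sel taken []).1 h
      exact ⟨h1, lt_of_le_of_lt (pvGenRound_mono pc sel taken p.1) h2⟩

lemma pvSum_lt (l : List String) (f g : String → Nat) (hle : ∀ x ∈ l, g x ≤ f x)
    (c : String) (hc : c ∈ l) (hlt : g c < f c) : (l.map g).sum < (l.map f).sum := by
  induction l with
  | nil => cases hc
  | cons a t ih =>
    simp only [List.map_cons, List.sum_cons]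
    rcases List.mem_cons.1 hc with rfl | hct
    · have : (t.map g).sum ≤ (t.map f).sum :=
        List.sum_le_sum (fun x hx => hle x (List.mem_cons_of_mem _ hx))
      omega
    · have h1 : g a ≤ f a := hle a (by simp)
      have h2 := ih (fun x hx => hle x (List.mem_cons_of_mem _ hx)) hct
      omega

lemma pvM_insert_le (pc : PySem.Dict String (List String)) (sel : List String)
    (idx : PySem.Dict String Int) (c : String) (h0 : 0 ≤ idx.getD c 0) :
    pvM pc sel (idx.insert c (idx.getD c 0 + 1)) ≤ pvM pc sel idx := by
  unfold pvM
  apply List.sum_le_sum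
  intro x _
  rw [PySem.Dict.getD_insert]
  split
  · next hxc => subst hxc; omega
  · exact le_refl _

lemma pvM_insert_lt (pc : PySem.Dict String (List String)) (sel : List String)
    (idx : PySem.Dict String Int) (c : String) (hc : c ∈ sel) (h0 : 0 ≤ idx.getD c 0)
    (hlt : idx.getD c 0 < pvLen pc c) :
    pvM pc sel (idx.insert c (idx.getD c 0 + 1)) < pvM pc sel idx := by
  unfold pvM
  refine pvSum_lt sel _ _ ?_ c hc ?_
  · intro x _
    rw [PySem.Dict.getD_insert]
    split
    · next hxc => subst hxc; omega
    · exact le_refl _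
  · rw [PySem.Dict.getD_insert, if_pos rfl]
    simp only [pvLen, PySem.List.len_eq] at hlt
    omega

lemma pvZeroIdx_aux (l : List String) : ∀ (d : PySem.Dict String Int), (∀ x, d.getD x 0 = 0) →
    ∀ x, (l.foldl (fun d c => d.insert c 0) d).getD x 0 = 0 := by
  induction l with
  | nil => intro d hd x; exact hd x
  | cons c rest ih =>
    intro d hd x
    simp only [List.foldl_cons]
    apply ih
    intro y
    rw [PySem.Dict.getD_insert]
    split
    · rfl
    · exact hd y

lemma pvZeroIdx_getD (l : List String) (x : String) : (pvZeroIdx l).getD x 0 = 0 := by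
  exact pvZeroIdx_aux l PySem.Dict.empty (fun y => PySem.Dict.getD_empty y 0) x

lemma pvWordCount_nonneg (s : String) : 0 ≤ pvWordCount s := by
  unfold pvWordCount
  exact Int.natCast_nonneg _

lemma pvInnerA_true (pc : PySem.Dict String (List String)) (maxW : Int) (sub : List String)
    (combined : List String) (total : Int) (idx : PySem.Dict String Int) :
    (pvInnerA pc maxW sub combined total idx true).2.2.2 = true := by
  induction sub generalizing combined total idx with
  | nil => rfl
  | cons c rest ih =>
    simp only [pvInnerA]
    by_cases h1 : PySem.List.len (pc.getD c []) ≤ idx.getD c 0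
    · rw [if_pos h1]; exact ih _ _ _
    · rw [if_neg h1]
      by_cases h2 : combined ≠ [] ∧ maxW < total + pvWordCount (PySem.List.pyGetD (pc.getD c []) (idx.getD c 0) "")
      · rw [if_pos h2]; exact ih _ _ _
      · rw [if_neg h2]
        by_cases h3 : maxW ≤ total + pvWordCount (PySem.List.pyGetD (pc.getD c []) (idx.getD c 0) "")
        · rw [if_pos h3]
        · rw [if_neg h3]; exact ih _ _ _

lemma pvInnerA_stuck (pc : PySem.Dict String (List String)) (maxW : Int) (sub : List String)
    (combined : List String) (total : Int) (idx : PySem.Dict String Int) (prog : Bool)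
    (h : ∀ c ∈ sub, pvLen pc c ≤ idx.getD c 0 ∨
      (combined ≠ [] ∧ maxW < total + pvHeadW pc idx c)) :
    pvInnerA pc maxW sub combined total idx prog = (combined, total, idx, prog) := by
  induction sub with
  | nil => rfl
  | cons c rest ih =>
    simp only [pvInnerA]
    by_cases h1 : PySem.List.len (pc.getD c []) ≤ idx.getD c 0
    · rw [if_pos h1]
      exact ih (fun x hx => h x (List.mem_cons_of_mem _ hx))
    · rw [if_neg h1]
      have h2 : combined ≠ [] ∧ maxW < total + pvWordCount (PySem.List.pyGetD (pc.getD c []) (idx.getD c 0) "") := by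
        rcases h c (by simp) with hl | hr
        · exact absurd hl h1
        · exact ⟨hr.1, by simpa [pvHeadW] using hr.2⟩
      rw [if_pos h2]
      exact ih (fun x hx => h x (List.mem_cons_of_mem _ hx))

-- the round lemma: one pass of A's inner loop corresponds to one generated round consumed by pvFill
lemma pvRound (pc : PySem.Dict String (List String)) (sel : List String) (maxW : Int) :
    ∀ (sub : List String), (∀ c ∈ sub, c ∈ sel) →
    ∀ (combined : List String) (total : Int) (idx taken : PySem.Dict String Int)
      (blocked : PySem.Set String) (prog0 : Bool) (rest' : List (String × String)),
      total < maxW →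
      pvInv pc sel maxW idx taken blocked combined total →
      ∃ blocked' : PySem.Set String,
        pvFill maxW ((pvGenRound pc sub taken []).2 ++ rest') combined total blocked
          = pvFill maxW rest' (pvInnerA pc maxW sub combined total idx prog0).1
              (pvInnerA pc maxW sub combined total idx prog0).2.1 blocked' ∧
        ((pvInnerA pc maxW sub combined total idx prog0).2.1 < maxW →
          pvInv pc sel maxW (pvInnerA pc maxW sub combined total idx prog0).2.2.1
            (pvGenRound pc sub taken []).1 blocked'
            (pvInnerA pc maxW sub combined total idx prog0).1
            (pvInnerA pc maxW sub combined total idx prog0).2.1) ∧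
        pvM pc sel (pvInnerA pc maxW sub combined total idx prog0).2.2.1 ≤ pvM pc sel idx ∧
        ((pvInnerA pc maxW sub combined total idx prog0).2.2.2 = true →
          prog0 = true ∨ pvM pc sel (pvInnerA pc maxW sub combined total idx prog0).2.2.1 < pvM pc sel idx) ∧
        ((pvInnerA pc maxW sub combined total idx prog0).2.2.2 = false →
          (pvInnerA pc maxW sub combined total idx prog0).1 = combined ∧
          (pvInnerA pc maxW sub combined total idx prog0).2.1 = total ∧
          (pvInnerA pc maxW sub combined total idx prog0).2.2.1 = idx ∧
          ∀ c ∈ sub, (pvGenRound pc sub taken []).1.getD c 0 < pvLen pc c → c ∈ blocked') ∧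
        (∀ x ∈ blocked, x ∈ blocked') := by
  intro sub
  induction sub with
  | nil =>
    intro _ combined total idx taken blocked prog0 rest' htot hinv
    refine ⟨blocked, by simp [pvGenRound, pvInnerA], ?_, le_refl _, ?_, ?_, fun x hx => hx⟩
    · intro _
      simpa [pvGenRound, pvInnerA] using hinv
    · intro h
      exact Or.inl (by simpa [pvInnerA] using h)
    · intro _
      exact ⟨rfl, rfl, rfl, fun c hc => absurd hc (List.not_mem_nil)⟩
  | cons c rest ih =>
    intro hsub combined total idx taken blocked prog0 rest' htot hinv
    obtain ⟨hidx0, htk0, hsync, hblk⟩ := hinv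
    have hnt : ¬ maxW ≤ total := not_le.2 htot
    by_cases hcb : c ∈ blocked
    · -- chapter already blocked: A skips its stuck head, fill skips the emitted chunk
      obtain ⟨hcsel, hcomb, hilen, hskip⟩ := hblk c hcb
      have h1 : ¬ (PySem.List.len (pc.getD c []) ≤ idx.getD c 0) := by
        simp only [pvLen] at hilen; omega
      have hA : pvInnerA pc maxW (c :: rest) combined total idx prog0
          = pvInnerA pc maxW rest combined total idx prog0 := by
        simp only [pvInnerA]
        rw [if_neg h1, if_pos ⟨hcomb, by simpa [pvHeadW] using hskip⟩]
      have hcc : PySem.Set.contains blocked c = true := (PySem.Set.contains_iff _ _).2 hcb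
      by_cases hitl : taken.getD c 0 < PySem.List.len (pc.getD c [])
      · have hG : pvGenRound pc (c :: rest) taken []
            = ((pvGenRound pc rest (taken.insert c (taken.getD c 0 + 1)) []).1,
               (c, PySem.List.pyGetD (pc.getD c []) (taken.getD c 0) "")
                 :: (pvGenRound pc rest (taken.insert c (taken.getD c 0 + 1)) []).2) := by
          simp only [pvGenRound, if_pos hitl]
          rw [pvGenRound_acc]
          simp
        have hinv' : pvInv pc sel maxW idx (taken.insert c (taken.getD c 0 + 1)) blocked combined total := by
          refine ⟨hidx0, ?_, ?_, hblk⟩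
          · intro x
            rw [PySem.Dict.getD_insert]
            split
            · have := htk0 c; omega
            · exact htk0 x
          · intro x hx hxb
            rw [PySem.Dict.getD_insert, if_neg (by rintro rfl; exact hxb hcb)]
            exact hsync x hx hxb
        obtain ⟨b', hc1, hc2, hc3, hc4, hc5, hc6⟩ :=
          ih (fun x hx => hsub x (List.mem_cons_of_mem _ hx)) combined total idx
            (taken.insert c (taken.getD c 0 + 1)) blocked prog0 rest' htot hinv'
        refine ⟨b', ?_, ?_, ?_, ?_, ?_, hc6⟩
        · rw [hG, hA]
          simp only [List.cons_append]
          rw [show pvFill maxW ((c, PySem.List.pyGetD (pc.getD c []) (taken.getD c 0) "")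
              :: ((pvGenRound pc rest (taken.insert c (taken.getD c 0 + 1)) []).2 ++ rest'))
              combined total blocked
            = pvFill maxW ((pvGenRound pc rest (taken.insert c (taken.getD c 0 + 1)) []).2 ++ rest')
              combined total blocked from by simp only [pvFill, if_neg hnt, if_pos hcc]]
          exact hc1
        · rw [hA, hG]; exact hc2
        · rw [hA]; exact hc3
        · rw [hA]; exact hc4
        · rw [hA, hG]
          intro hpf
          obtain ⟨e1, e2, e3, e4⟩ := hc5 hpf
          refine ⟨e1, e2, e3, ?_⟩
          intro x hx hxl
          rcases List.mem_cons.1 hx with rfl | hxr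
          · exact hc6 x hcb
          · exact e4 x hxr hxl
      · have hG : pvGenRound pc (c :: rest) taken [] = pvGenRound pc rest taken [] := by
          simp only [pvGenRound, if_neg hitl]
        obtain ⟨b', hc1, hc2, hc3, hc4, hc5, hc6⟩ :=
          ih (fun x hx => hsub x (List.mem_cons_of_mem _ hx)) combined total idx
            taken blocked prog0 rest' htot ⟨hidx0, htk0, hsync, hblk⟩
        refine ⟨b', ?_, ?_, ?_, ?_, ?_, hc6⟩
        · rw [hG, hA]; exact hc1
        · rw [hA, hG]; exact hc2
        · rw [hA]; exact hc3
        · rw [hA]; exact hc4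
        · rw [hA, hG]
          intro hpf
          obtain ⟨e1, e2, e3, e4⟩ := hc5 hpf
          refine ⟨e1, e2, e3, ?_⟩
          intro x hx hxl
          rcases List.mem_cons.1 hx with rfl | hxr
          · exfalso
            have := pvGenRound_mono pc rest taken x
            simp only [pvLen] at hxl
            omega
          · exact e4 x hxr hxl
    · -- chapter not blocked
      have hcsel : c ∈ sel := hsub c (by simp)
      have hsyncc : taken.getD c 0 = idx.getD c 0 := hsync c hcsel hcb
      have hccf : PySem.Set.contains blocked c = false := by
        rw [Bool.eq_false_iff]
        exact fun h => hcb ((PySem.Set.contains_iff _ _).1 h)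
      by_cases h1 : PySem.List.len (pc.getD c []) ≤ idx.getD c 0
      · -- exhausted chapter: both sides skip, nothing emitted
        have hA : pvInnerA pc maxW (c :: rest) combined total idx prog0
            = pvInnerA pc maxW rest combined total idx prog0 := by
          simp only [pvInnerA]; rw [if_pos h1]
        have hitl : ¬ taken.getD c 0 < PySem.List.len (pc.getD c []) := by omega
        have hG : pvGenRound pc (c :: rest) taken [] = pvGenRound pc rest taken [] := by
          simp only [pvGenRound, if_neg hitl]
        obtain ⟨b', hc1, hc2, hc3, hc4, hc5, hc6⟩ :=
          ih (fun x hx => hsub x (List.mem_cons_of_mem _ hx)) combined total idx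
            taken blocked prog0 rest' htot ⟨hidx0, htk0, hsync, hblk⟩
        refine ⟨b', ?_, ?_, ?_, ?_, ?_, hc6⟩
        · rw [hG, hA]; exact hc1
        · rw [hA, hG]; exact hc2
        · rw [hA]; exact hc3
        · rw [hA]; exact hc4
        · rw [hA, hG]
          intro hpf
          obtain ⟨e1, e2, e3, e4⟩ := hc5 hpf
          refine ⟨e1, e2, e3, ?_⟩
          intro x hx hxl
          rcases List.mem_cons.1 hx with rfl | hxr
          · exfalso
            have := pvGenRound_mono pc rest taken x
            simp only [pvLen] at hxl
            omega
          · exact e4 x hxr hxl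
      · -- c has a next chunk, same one on both sides
        have hitl : taken.getD c 0 < PySem.List.len (pc.getD c []) := by omega
        have hG : pvGenRound pc (c :: rest) taken []
            = ((pvGenRound pc rest (taken.insert c (taken.getD c 0 + 1)) []).1,
               (c, PySem.List.pyGetD (pc.getD c []) (taken.getD c 0) "")
                 :: (pvGenRound pc rest (taken.insert c (taken.getD c 0 + 1)) []).2) := by
          simp only [pvGenRound, if_pos hitl]
          rw [pvGenRound_acc]
          simp
        rw [hsyncc] at hG
        by_cases h2 : combined ≠ [] ∧ maxW < total + pvWordCount (PySem.List.pyGetD (pc.getD c []) (idx.getD c 0) "")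
        · -- chunk does not fit: A leaves the index, fill blocks the chapter
          have hA : pvInnerA pc maxW (c :: rest) combined total idx prog0
              = pvInnerA pc maxW rest combined total idx prog0 := by
            simp only [pvInnerA]; rw [if_neg h1, if_pos h2]
          have hinv' : pvInv pc sel maxW idx (taken.insert c (idx.getD c 0 + 1))
              (PySem.Set.add blocked c) combined total := by
            refine ⟨hidx0, ?_, ?_, ?_⟩
            · intro x
              rw [PySem.Dict.getD_insert]
              split
              · have := hidx0 c; omega
              · exact htk0 x
            · intro x hx hxb
              have hxb1 : x ∉ blocked := fun h => hxb ((PySem.Set.mem_add _ _ _).2 (Or.inl h))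
              have hxb2 : ¬ x = c := fun h => hxb ((PySem.Set.mem_add _ _ _).2 (Or.inr h))
              rw [PySem.Dict.getD_insert, if_neg hxb2]
              exact hsync x hx hxb1
            · intro x hx
              rw [PySem.Set.mem_add _ _ _] at hx
              rcases hx with hx | rfl
              · exact hblk x hx
              · refine ⟨hcsel, h2.1, by simp only [pvLen]; omega, ?_⟩
                simp only [pvHeadW]
                exact h2.2
          obtain ⟨b', hc1, hc2, hc3, hc4, hc5, hc6⟩ :=
            ih (fun x hx => hsub x (List.mem_cons_of_mem _ hx)) combined total idx
              (taken.insert c (idx.getD c 0 + 1)) (PySem.Set.add blocked c) prog0 rest' htot hinv'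
          refine ⟨b', ?_, ?_, ?_, ?_, ?_, ?_⟩
          · rw [hG, hA]
            simp only [List.cons_append]
            rw [show pvFill maxW ((c, PySem.List.pyGetD (pc.getD c []) (idx.getD c 0) "")
                :: ((pvGenRound pc rest (taken.insert c (idx.getD c 0 + 1)) []).2 ++ rest'))
                combined total blocked
              = pvFill maxW ((pvGenRound pc rest (taken.insert c (idx.getD c 0 + 1)) []).2 ++ rest')
                combined total (PySem.Set.add blocked c) from by
                simp only [pvFill, if_neg hnt, hccf, if_neg (Bool.false_ne_true), if_pos h2]]
            exact hc1
          · rw [hA, hG]; exact hc2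
          · rw [hA]; exact hc3
          · rw [hA]; exact hc4
          · rw [hA, hG]
            intro hpf
            obtain ⟨e1, e2, e3, e4⟩ := hc5 hpf
            refine ⟨e1, e2, e3, ?_⟩
            intro x hx hxl
            rcases List.mem_cons.1 hx with rfl | hxr
            · exact hc6 x ((PySem.Set.mem_add _ _ _).2 (Or.inr rfl))
            · exact e4 x hxr hxl
          · intro x hx
            exact hc6 x ((PySem.Set.mem_add _ _ _).2 (Or.inl hx))
        · -- chunk fits (or the list is still empty): both sides append the same entry
          have hA : pvInnerA pc maxW (c :: rest) combined total idx prog0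
              = (if maxW ≤ total + pvWordCount (PySem.List.pyGetD (pc.getD c []) (idx.getD c 0) "") then
                  (combined ++ ["[" ++ c ++ "]\n" ++ PySem.List.pyGetD (pc.getD c []) (idx.getD c 0) ""],
                   total + pvWordCount (PySem.List.pyGetD (pc.getD c []) (idx.getD c 0) ""),
                   idx.insert c (idx.getD c 0 + 1), true)
                 else pvInnerA pc maxW rest
                  (combined ++ ["[" ++ c ++ "]\n" ++ PySem.List.pyGetD (pc.getD c []) (idx.getD c 0) ""])
                  (total + pvWordCount (PySem.List.pyGetD (pc.getD c []) (idx.getD c 0) ""))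
                  (idx.insert c (idx.getD c 0 + 1)) true) := by
            simp only [pvInnerA]; rw [if_neg h1, if_neg h2]
          have hfillstep : pvFill maxW ((c, PySem.List.pyGetD (pc.getD c []) (idx.getD c 0) "")
                :: ((pvGenRound pc rest (taken.insert c (idx.getD c 0 + 1)) []).2 ++ rest'))
                combined total blocked
              = pvFill maxW ((pvGenRound pc rest (taken.insert c (idx.getD c 0 + 1)) []).2 ++ rest')
                (combined ++ ["[" ++ c ++ "]\n" ++ PySem.List.pyGetD (pc.getD c []) (idx.getD c 0) ""])
                (total + pvWordCount (PySem.List.pyGetD (pc.getD c []) (idx.getD c 0) "")) blocked := by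
            simp only [pvFill, if_neg hnt, hccf, if_neg (Bool.false_ne_true), if_neg h2]
          by_cases h3 : maxW ≤ total + pvWordCount (PySem.List.pyGetD (pc.getD c []) (idx.getD c 0) "")
          · -- budget reached: A breaks out, fill drains the remainder unchanged
            rw [if_pos h3] at hA
            refine ⟨blocked, ?_, ?_, ?_, ?_, ?_, fun x hx => hx⟩
            · rw [hG, hA]
              simp only [List.cons_append]
              rw [hfillstep, pvFill_done _ _ _ _ _ h3, pvFill_done _ _ _ _ _ h3]
            · rw [hA]
              intro hcontr
              exact absurd hcontr (by simp only []; omega)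
            · rw [hA]
              exact pvM_insert_le pc sel idx c (hidx0 c)
            · rw [hA]
              intro _
              exact Or.inr (pvM_insert_lt pc sel idx c hcsel (hidx0 c)
                (by simp only [pvLen]; omega))
            · rw [hA]
              intro hcontr
              simp at hcontr
          · -- still under budget: continue the round on both sides
            rw [if_neg h3] at hA
            have htot' : total + pvWordCount (PySem.List.pyGetD (pc.getD c []) (idx.getD c 0) "") < maxW := by omega
            have hinv' : pvInv pc sel maxW (idx.insert c (idx.getD c 0 + 1))
                (taken.insert c (idx.getD c 0 + 1)) blocked
                (combined ++ ["[" ++ c ++ "]\n" ++ PySem.List.pyGetD (pc.getD c []) (idx.getD c 0) ""])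
                (total + pvWordCount (PySem.List.pyGetD (pc.getD c []) (idx.getD c 0) "")) := by
              refine ⟨?_, ?_, ?_, ?_⟩
              · intro x
                rw [PySem.Dict.getD_insert]
                split
                · have := hidx0 c; omega
                · exact hidx0 x
              · intro x
                rw [PySem.Dict.getD_insert]
                split
                · have := hidx0 c; omega
                · exact htk0 x
              · intro x hx hxb
                rw [PySem.Dict.getD_insert, PySem.Dict.getD_insert]
                split
                · rfl
                · exact hsync x hx hxb
              · intro x hx
                obtain ⟨f1, f2, f3, f4⟩ := hblk x hx
                have hxc : ¬ x = c := by rintro rfl; exact hcb hx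
                refine ⟨f1, by simp, ?_, ?_⟩
                · rw [PySem.Dict.getD_insert, if_neg hxc]; exact f3
                · have hw := pvWordCount_nonneg (PySem.List.pyGetD (pc.getD c []) (idx.getD c 0) "")
                  have : pvHeadW pc (idx.insert c (idx.getD c 0 + 1)) x = pvHeadW pc idx x := by
                    simp only [pvHeadW]
                    rw [PySem.Dict.getD_insert, if_neg hxc]
                  rw [this]
                  omega
            obtain ⟨b', hc1, hc2, hc3, hc4, hc5, hc6⟩ :=
              ih (fun x hx => hsub x (List.mem_cons_of_mem _ hx))
                (combined ++ ["[" ++ c ++ "]\n" ++ PySem.List.pyGetD (pc.getD c []) (idx.getD c 0) ""])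
                (total + pvWordCount (PySem.List.pyGetD (pc.getD c []) (idx.getD c 0) ""))
                (idx.insert c (idx.getD c 0 + 1)) (taken.insert c (idx.getD c 0 + 1))
                blocked true rest' htot' hinv'
            refine ⟨b', ?_, ?_, ?_, ?_, ?_, hc6⟩
            · rw [hG, hA]
              simp only [List.cons_append]
              rw [hfillstep]
              exact hc1
            · rw [hA, hG]; exact hc2
            · rw [hA]
              exact le_trans hc3 (pvM_insert_le pc sel idx c (hidx0 c))
            · rw [hA]
              intro _
              exact Or.inr (lt_of_le_of_lt hc3 (pvM_insert_lt pc sel idx c hcsel (hidx0 c)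
                (by simp only [pvLen]; omega)))
            · rw [hA]
              intro hcontr
              rw [pvInnerA_true] at hcontr
              cases hcontr

-- the outer loop of A equals pvFill over the generated order
lemma pvOuter_eq (pc : PySem.Dict String (List String)) (sel : List String) (maxW : Int) :
    ∀ (fuel r : Nat) (combined : List String) (total : Int)
      (idx taken : PySem.Dict String Int) (blocked : PySem.Set String),
      pvInv pc sel maxW idx taken blocked combined total →
      pvM pc sel idx < fuel →
      (∀ c ∈ sel, (pc.getD c []).length ≤ (taken.getD c 0).toNat + r) →
      pvOuterA pc sel maxW fuel combined total idx
        = pvFill maxW (pvGen pc sel r taken []) combined total blocked := by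
  intro fuel
  induction fuel with
  | zero =>
    intro r combined total idx taken blocked _ hM _
    omega
  | succ fuel ihf =>
    intro r combined total idx taken blocked hinv hM hr
    by_cases htot : total < maxW
    · cases r with
      | zero =>
        have hstuck : pvInnerA pc maxW sel combined total idx false = (combined, total, idx, false) := by
          apply pvInnerA_stuck
          intro c hc
          by_cases hcb : c ∈ blocked
          · obtain ⟨_, hcomb, _, hskip⟩ := hinv.2.2.2 c hcb
            exact Or.inr ⟨hcomb, hskip⟩
          · left
            have hs := hinv.2.2.1 c hc hcb
            have hlen := hr c hc
            have ht0 := hinv.2.1 c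
            simp only [pvLen, PySem.List.len_eq]
            omega
        simp only [pvOuterA, if_pos htot, hstuck]
        simp [pvGen, pvFill]
      | succ r' =>
        obtain ⟨b', hc1, hc2, hc3, hc4, hc5, hc6⟩ :=
          pvRound pc sel maxW sel (fun _ h => h) combined total idx taken blocked false
            (pvGen pc sel r' (pvGenRound pc sel taken []).1 []) htot hinv
        rw [pvGen_succ, hc1]
        simp only [pvOuterA, if_pos htot]
        by_cases hprog : (pvInnerA pc maxW sel combined total idx false).2.2.2 = true
        · rw [if_pos hprog]
          by_cases hRt : (pvInnerA pc maxW sel combined total idx false).2.1 < maxW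
          · rw [ihf r' (pvInnerA pc maxW sel combined total idx false).1
                (pvInnerA pc maxW sel combined total idx false).2.1
                (pvInnerA pc maxW sel combined total idx false).2.2.1
                (pvGenRound pc sel taken []).1 b' (hc2 hRt) ?_ ?_]
            · rcases hc4 hprog with hfalse | hMlt
              · cases hfalse
              · omega
            · intro c hc
              have hold := hr c hc
              have ht0 := hinv.2.1 c
              have hmono := pvGenRound_mono pc sel taken c
              by_cases hcl : taken.getD c 0 < pvLen pc c
              · have hadv := pvGenRound_advance pc sel taken c hc hcl
                simp only [pvLen, PySem.List.len_eq] at hcl hadv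
                omega
              · simp only [pvLen, PySem.List.len_eq] at hcl
                omega
          · have hL : pvOuterA pc sel maxW fuel (pvInnerA pc maxW sel combined total idx false).1
                (pvInnerA pc maxW sel combined total idx false).2.1
                (pvInnerA pc maxW sel combined total idx false).2.2.1
                = (pvInnerA pc maxW sel combined total idx false).1 := by
              cases fuel with
              | zero => rfl
              | succ f => simp only [pvOuterA, if_neg hRt]
            rw [hL, pvFill_done _ _ _ _ _ (not_lt.1 hRt)]
        · rw [if_neg hprog]
          obtain ⟨e1, e2, e3, e4⟩ := hc5 (Bool.not_eq_true _ ▸ hprog)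
          rw [e1, e2]
          rw [pvFill_blocked]
          intro p hp
          obtain ⟨hp1, hp2⟩ := pvGen_mem pc sel r' (pvGenRound pc sel taken []).1 p hp
          exact e4 p.1 hp1 hp2
    · rw [pvFill_done _ _ _ _ _ (not_lt.1 htot)]
      simp [pvOuterA, htot]

-- ===== VERDICT (by name: the statement is the Claim_ definition above) =====
theorem retrieve_chapter_context_spec : Claim_equal_retrieve_chapter_context := by
  unfold Claim_equal_retrieve_chapter_context
  intro cc sel pt maxW _hdom hpre
  obtain ⟨hne, hmem, _hpos, _hsome⟩ := hpre
  unfold Spec_retrieve_chapter_context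
  unfold retrieve_chapter_context retrieve_chapter_context_alt
  rw [if_neg hne, if_neg hne]
  have hmiss : sel.filter (fun c => !(PySem.Dict.mk cc).contains c) = [] := by
    rw [List.filter_eq_nil_iff]
    intro c hc
    simp only [hmem c hc, Bool.not_true, Bool.false_eq_true, not_false_eq_true]
  have hnn : ¬ (sel.filter (fun c => !(PySem.Dict.mk cc).contains c) ≠ []) := fun h => h hmiss
  rw [if_neg hnn, if_neg hnn]
  dsimp only
  have hzero : ∀ x, (pvZeroIdx sel).getD x 0 = (0 : Int) := pvZeroIdx_getD sel
  have hmain := pvOuter_eq (pvSortedDict cc sel pt) sel maxW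
      ((sel.map (fun c => ((pvSortedDict cc sel pt).getD c []).length)).sum + 1)
      (sel.foldl (fun acc c => max acc (((pvSortedDict cc sel pt).getD c []).length)) 0)
      [] 0 (pvZeroIdx sel) (pvZeroIdx sel) PySem.Set.empty
      ⟨fun x => by rw [hzero x], fun x => by rw [hzero x],
       fun x _ _ => rfl,
       fun x hx => absurd hx (by simp [PySem.Set.empty])⟩
      (by
        have heq : pvM (pvSortedDict cc sel pt) sel (pvZeroIdx sel)
            = (sel.map (fun c => ((pvSortedDict cc sel pt).getD c []).length)).sum := by
          unfold pvM
          congr 1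
          apply List.map_congr_left
          intro c _
          rw [hzero c]
          simp
        omega)
      (by
        intro c hc
        rw [hzero c]
        simpa using (PySem.List.le_foldl_max_nat sel
          (fun c => ((pvSortedDict cc sel pt).getD c []).length) 0).2 c hc)
  rw [hmain]
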